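-- pv_equiv track=rewrite | github.com/ViraKrajevskiy/Python-tasks | 18/125.py | array_125
-- ===== SOURCE A (Python) =====
-- def array_125(array, K):
--     result = []
--     current_series = []
--     previous_value = None
--
--     for element in array:
--         if element == previous_value:
--             current_series.append(element)
--         else:
--             if len(current_series) < K:
--                 result.extend([len(current_series)] * len(current_series))
--             else:
--                 result.extend(current_series)
--             current_series = [element]
--         previous_value = element
--
--     if len(current_series) < K:
--         result.extend([len(current_series)] * len(current_series))
--     else:
--         result.extend(current_series)
--
--     return result
-- ===== SOURCE B (Python) =====
-- def array_125(array, K):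
--     # Two-pointer index scan: advance j to the end of the run starting at i,
--     # then append the expanded chunk ([c]*c if short, else the slice) and jump i to j.
--     out = []
--     n = len(array)
--     i = 0
--     while i < n:
--         v = array[i]
--         j = i
--         while j < n and array[j] == v:
--             j += 1
--         c = j - i
--         out += [c] * c if c < K else array[i:j]
--         i = j
--     return out
-- ===== Notes on version B (the rewrite author's own statement) =====
-- stated objective: alternative
-- what changed: B replaces A's buffered state machine (previous_value/current_series lists built element by element) with an index-based two-pointer scan: an inner pointer j finds the end of the run starting at i, and the output chunk is produced from the indices (a count or the slice array[i:j]) with no per-element buffering.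
import Mathlib
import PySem

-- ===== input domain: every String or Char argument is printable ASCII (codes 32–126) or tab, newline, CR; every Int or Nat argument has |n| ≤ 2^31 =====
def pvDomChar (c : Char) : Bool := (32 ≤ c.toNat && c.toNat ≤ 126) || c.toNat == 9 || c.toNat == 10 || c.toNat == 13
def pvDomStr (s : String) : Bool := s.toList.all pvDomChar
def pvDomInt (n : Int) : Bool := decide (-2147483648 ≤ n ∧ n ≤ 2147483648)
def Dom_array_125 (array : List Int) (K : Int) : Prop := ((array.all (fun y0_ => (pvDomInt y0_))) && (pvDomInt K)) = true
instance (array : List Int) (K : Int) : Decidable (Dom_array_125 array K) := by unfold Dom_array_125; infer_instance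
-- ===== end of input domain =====

-- B replaces A's buffered previous_value/current_series state machine by an index-based
-- two-pointer run scan producing chunks from indices/slices (same cost; objective: alternative).


-- ===== PORT A =====
-- the duplicated flush expression of A ('if len(current_series) < K: result.extend([len]*len) else: result.extend(cs)')
def pvFlushA (K : Int) (cs : List Int) : List Int :=
  if (cs.length : Int) < K then List.replicate cs.length (cs.length : Int) else cs

def pvStepA (K : Int) (st : List Int × List Int × Option Int) (e : Int) :
    List Int × List Int × Option Int :=
  if some e = st.2.2 then (st.1, st.2.1 ++ [e], some e)
  else (st.1 ++ pvFlushA K st.2.1, [e], some e)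

def array_125 (array : List Int) (K : Int) : List Int :=
  let s := array.foldl (pvStepA K) ([], [], none)
  s.1 ++ pvFlushA K s.2.1

-- ===== PORT B =====
-- inner while loop: 'while j < n and array[j] == v: j += 1'; fuel (= n - j at the call) only
-- makes the recursion structural, it never cuts the loop short (indexing is in range whenever tested)
def pvRunEndAux (array : List Int) (v : Int) : Nat → Nat → Nat
  | 0, j => j
  | fuel + 1, j =>
    if h : j < array.length then
      if array[j] = v then pvRunEndAux array v fuel (j + 1) else j
    else j

def pvRunEnd (array : List Int) (v : Int) (j : Nat) : Nat :=
  pvRunEndAux array v (array.length - j) j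

-- outer while loop with accumulator 'out'; fuel (= n at the call) again only makes it structural,
-- since i advances by at least one run each iteration; the Python slice array[i:j] (0 ≤ i ≤ j) is
-- ported by hand as (array.drop i).take (j - i), exact for these in-range indices
def pvOuterB (array : List Int) (K : Int) : Nat → List Int → Nat → List Int
  | 0, out, _ => out
  | fuel + 1, out, i =>
    if h : i < array.length then
      let j := pvRunEnd array array[i] i
      let c := j - i
      pvOuterB array K fuel (out ++ (if (c : Int) < K then List.replicate c (c : Int) else (array.drop i).take c)) j
    else out

def array_125_alt (array : List Int) (K : Int) : List Int :=
  pvOuterB array K array.length [] 0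

-- ===== PRECONDITION & SPEC =====
def Spec_array_125 (array : List Int) (K : Int) (out : List Int) : Prop := out = array_125_alt array K
instance (array : List Int) (K : Int) (out : List Int) : Decidable (Spec_array_125 array K out) := by unfold Spec_array_125; infer_instance

-- ===== CLAIM (what is proved, stated in full; the proofs are below) =====
def Claim_equal_array_125 : Prop := ∀ (array : List Int) (K : Int), Dom_array_125 array K → Spec_array_125 array K (array_125 array K)

-- ===== LEMMAS AND PROOFS =====

-- the common specification: process the leading maximal run, recurse on the rest
def pvExpandR (K v : Int) (c : Nat) : List Int :=
  if (c : Int) < K then List.replicate c (c : Int) else List.replicate c v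

def runSpec (K : Int) : List Int → List Int
  | [] => []
  | x :: xs =>
      pvExpandR K x (1 + (xs.takeWhile (fun y => y = x)).length)
        ++ runSpec K (xs.dropWhile (fun y => y = x))
termination_by l => l.length
decreasing_by
  have := List.length_dropWhile_le (fun y => y = x) xs
  simp at *; omega

lemma flush_replicate (K v : Int) (c : Nat) :
    pvFlushA K (List.replicate c v) = pvExpandR K v c := by
  simp [pvFlushA, pvExpandR]

-- ===== A-side: the fold equals runSpec =====
lemma A_fold (K : Int) (l : List Int) : ∀ (res : List Int) (v : Int) (m : Nat),
    (let s := l.foldl (pvStepA K) (res, List.replicate (m + 1) v, some v)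
     s.1 ++ pvFlushA K s.2.1)
    = res ++ pvExpandR K v ((m + 1) + (l.takeWhile (fun y => y = v)).length)
        ++ runSpec K (l.dropWhile (fun y => y = v)) := by
  induction l with
  | nil =>
      intro res v m
      simp [runSpec, flush_replicate]
  | cons x t ih =>
      intro res v m
      by_cases hx : x = v
      · subst hx
        have hrep : List.replicate (m + 1) x ++ [x] = List.replicate (m + 1 + 1) x := by
          simp [List.replicate_succ' (n := m + 1)]
        have hstep : pvStepA K (res, List.replicate (m + 1) x, some x) x
            = (res, List.replicate (m + 1 + 1) x, some x) := by
          simp [pvStepA, hrep]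
        simp only [List.foldl_cons, hstep]
        have hih := ih res x (m + 1)
        simp only at hih
        rw [hih]
        have htw : List.takeWhile (fun y => decide (y = x)) (x :: t)
            = x :: List.takeWhile (fun y => decide (y = x)) t := by simp
        have hdw : List.dropWhile (fun y => decide (y = x)) (x :: t)
            = List.dropWhile (fun y => decide (y = x)) t := by simp
        rw [htw, hdw]
        simp only [List.length_cons]
        set L := (List.takeWhile (fun y => decide (y = x)) t).length with hL
        have hc : m + 1 + 1 + L = m + 1 + (L + 1) := by omega
        rw [hc]
      · have hne : ¬ some x = some v := by simp [hx]
        have hih := ih (res ++ pvFlushA K (List.replicate (m + 1) v)) x 0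
        simp only at hih
        simp only [List.foldl_cons, pvStepA, if_neg hne]
        have h1 : (res ++ pvFlushA K (List.replicate (m + 1) v), ([x] : List Int), some x)
            = (res ++ pvFlushA K (List.replicate (m + 1) v), List.replicate (0 + 1) x, some x) := by
          simp
        rw [h1, hih, flush_replicate]
        have htw : List.takeWhile (fun y => decide (y = v)) (x :: t) = [] := by simp [hx]
        have hdw : List.dropWhile (fun y => decide (y = v)) (x :: t) = x :: t := by simp [hx]
        rw [htw, hdw]
        simp [runSpec, List.append_assoc]

lemma A_eq_runSpec (array : List Int) (K : Int) : array_125 array K = runSpec K array := by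
  cases array with
  | nil => simp [array_125, pvFlushA, runSpec]
  | cons x xs =>
      have hstep : pvStepA K ([], [], none) x = ([], List.replicate (0 + 1) x, some x) := by
        simp [pvStepA, pvFlushA]
      simp only [array_125, List.foldl_cons, hstep]
      have := A_fold K xs [] x 0
      simp only [this]
      simp [runSpec]

-- ===== B-side: takeWhile/dropWhile bookkeeping =====
lemma take_takeWhile_len {α : Type} (p : α → Bool) (l : List α) :
    l.take (l.takeWhile p).length = l.takeWhile p := by
  induction l with
  | nil => rfl
  | cons x t ih =>
      by_cases h : p x
      · simp [h, ih]
      · simp [h]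

lemma drop_takeWhile_len {α : Type} (p : α → Bool) (l : List α) :
    l.drop (l.takeWhile p).length = l.dropWhile p := by
  induction l with
  | nil => rfl
  | cons x t ih =>
      by_cases h : p x
      · simp [h, ih]
      · simp [h]

lemma takeWhile_eq_replicate (v : Int) (l : List Int) :
    l.takeWhile (fun y => y = v) = List.replicate (l.takeWhile (fun y => y = v)).length v := by
  induction l with
  | nil => rfl
  | cons x t ih =>
      by_cases h : x = v
      · subst h
        simp [List.replicate_succ]
        exact ih
      · simp [h]

lemma runEndAux_eq (array : List Int) (v : Int) :
    ∀ (fuel j : Nat), array.length - j ≤ fuel →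
      pvRunEndAux array v fuel j = j + ((array.drop j).takeWhile (fun y => y = v)).length := by
  intro fuel
  induction fuel with
  | zero =>
      intro j hle
      have hge : array.length ≤ j := by omega
      simp [pvRunEndAux, List.drop_eq_nil_of_le hge]
  | succ fuel ih =>
      intro j hle
      rw [pvRunEndAux]
      split
      · rename_i h
        have hdrop : array.drop j = array[j] :: array.drop (j + 1) :=
          List.drop_eq_getElem_cons h
        split
        · rename_i heq
          rw [ih (j + 1) (by omega), hdrop]
          simp [heq]
          omega
        · rename_i hne
          rw [hdrop]
          simp [hne]
      · rename_i h
        have : array.drop j = [] := List.drop_eq_nil_of_le (by omega)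
        simp [this]

lemma runEnd_eq (array : List Int) (v : Int) (j : Nat) :
    pvRunEnd array v j = j + ((array.drop j).takeWhile (fun y => y = v)).length :=
  runEndAux_eq array v (array.length - j) j (le_refl _)

lemma B_outer (array : List Int) (K : Int) : ∀ (fuel i : Nat), array.length - i ≤ fuel →
    ∀ (out : List Int), pvOuterB array K fuel out i = out ++ runSpec K (array.drop i) := by
  intro fuel
  induction fuel with
  | zero =>
      intro i hle out
      have hge : array.length ≤ i := by omega
      rw [pvOuterB]
      simp [List.drop_eq_nil_of_le hge, runSpec]
  | succ fuel ih =>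
      intro i hle out
      rw [pvOuterB]
      split
      · rename_i h
        set v := array[i] with hv
        have hdrop : array.drop i = v :: array.drop (i + 1) := List.drop_eq_getElem_cons h
        have hje : pvRunEnd array v i = i + ((array.drop i).takeWhile (fun y => y = v)).length :=
          runEnd_eq array v i
        have htw : (array.drop i).takeWhile (fun y => y = v)
            = v :: (array.drop (i + 1)).takeWhile (fun y => y = v) := by
          rw [hdrop]; simp
        set t1 := ((array.drop (i + 1)).takeWhile (fun y => y = v)).length with ht1
        have hj : pvRunEnd array v i = i + (1 + t1) := by
          rw [hje, htw]; simp [ht1]; omega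
        have hc : pvRunEnd array v i - i = 1 + t1 := by omega
        -- the slice chunk equals replicate
        have hlen : 1 + t1 = ((array.drop i).takeWhile (fun y => y = v)).length := by
          rw [htw]; simp [ht1]; omega
        have hslice : (array.drop i).take (1 + t1) = List.replicate (1 + t1) v := by
          rw [hlen, take_takeWhile_len, takeWhile_eq_replicate]
          simp
        have hrest : array.drop (pvRunEnd array v i)
            = (array.drop (i + 1)).dropWhile (fun y => y = v) := by
          have h1 : List.drop (pvRunEnd array v i) array
              = List.drop ((List.takeWhile (fun y => decide (y = v)) (List.drop i array)).length)
                  (List.drop i array) := by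
            rw [List.drop_drop, hje, Nat.add_comm]
          rw [h1, drop_takeWhile_len, hdrop]
          simp
        have hrec := ih (pvRunEnd array v i) (by omega)
        rw [hrec]
        rw [hrest]
        have hrun : runSpec K (array.drop i)
            = pvExpandR K v (1 + t1) ++ runSpec K ((array.drop (i + 1)).dropWhile (fun y => y = v)) := by
          rw [hdrop]
          simp [runSpec, ht1]
        rw [hrun]
        simp only [hc, hslice, pvExpandR]
        split <;> simp
      · rename_i h
        have hge : array.length ≤ i := by omega
        simp [List.drop_eq_nil_of_le hge, runSpec]

lemma B_eq_runSpec (array : List Int) (K : Int) : array_125_alt array K = runSpec K array := by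
  have := B_outer array K array.length 0 (by omega) []
  simpa [array_125_alt] using this

-- ===== VERDICT (by name: the statement is the Claim_ definition above) =====
theorem array_125_spec : Claim_equal_array_125 := by
  intro array K _
  unfold Spec_array_125
  rw [A_eq_runSpec, B_eq_runSpec]
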